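-- pv_equiv track=rewrite | github.com/liupengsay/PyIsTheBestLang | algorithm/src/basis/circular_section.py | compute_circle_result
-- ===== SOURCE A (Python) =====
-- def compute_circle_result(n: int, m: int, x: int, tm: int) -> int:
--
--     # 模板: 使用哈希与列表模拟记录循环节开始位置
--     dct = dict()
--     # 计算 x 每次加 m 加了 tm 次后模 n 的循环态
--     lst = []
--     while x not in dct:
--         dct[x] = len(lst)
--         lst.append(x)
--         x = (x + m) % n
--
--     # 此时加 m 次数状态为 0.1...length-1
--     length = len(lst)
--     # 在 ind 次处出现循节
--     ind = dct[x]
--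
--     # 所求次数不超出循环节
--     if tm < length:
--         return lst[tm]
--
--     # 所求次数进入循环节
--     circle = length - ind
--     tm -= length
--     j = tm % circle
--     return lst[ind + j]
-- ===== SOURCE B (Python) =====
-- def compute_circle_result(n: int, m: int, x: int, tm: int) -> int:
--     # Closed form: after tm additions of m modulo n, the value is (x + m*tm) % n
--     # (for tm >= 1 every step reduces mod n; for tm == 0 the original x is returned unreduced).
--     return x if tm == 0 else (x + m * tm) % n
-- ===== Notes on version B (the rewrite author's own statement) =====
-- stated objective: faster
-- what changed: Replaced the hash-map cycle-detection simulation of the orbit x -> (x+m) % n with the O(1) closed form (x + m*tm) % n (returning x unreduced when tm == 0, exactly as A does).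
-- outside the precondition, e.g. on compute_circle_result(0, 1, 2, 3): A raises ZeroDivisionError, B raises ZeroDivisionError; on compute_circle_result(5, 1, 7, -1): A returns 2, B returns 1; on compute_circle_result(5, 1, 2, -100): A raises IndexError, B returns 2
import Mathlib
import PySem

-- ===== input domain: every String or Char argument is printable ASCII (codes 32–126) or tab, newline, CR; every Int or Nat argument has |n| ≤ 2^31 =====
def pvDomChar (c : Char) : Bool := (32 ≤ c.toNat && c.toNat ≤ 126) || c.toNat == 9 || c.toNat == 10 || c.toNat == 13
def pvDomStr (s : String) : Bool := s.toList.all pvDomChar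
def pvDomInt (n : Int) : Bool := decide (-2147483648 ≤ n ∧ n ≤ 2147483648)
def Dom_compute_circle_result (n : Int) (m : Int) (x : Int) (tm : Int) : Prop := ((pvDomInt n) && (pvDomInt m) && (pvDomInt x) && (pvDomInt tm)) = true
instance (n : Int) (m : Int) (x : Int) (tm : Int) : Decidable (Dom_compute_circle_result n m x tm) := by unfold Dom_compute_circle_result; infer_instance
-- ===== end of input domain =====

-- B replaces A's hash-map cycle-detection simulation by the O(1) closed form (x + m*tm) % n (x itself for tm = 0).


-- ===== PORT A =====
-- the while loop: while x not in dct: dct[x] = len(lst); lst.append(x); x = (x + m) % n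
-- dct is a Python hash dict and lst a Python list: modelled by Std.HashMap / Array (exact: only
-- membership, fresh-key insert, lookup, append, len and indexing are used).  The loop state and the
-- iteration order are exactly Python's; fuel n.natAbs + 2 always suffices when n ≠ 0 (the loop stops
-- after at most |n| + 1 insertions, see ccrLoop_run below).
def ccrLoop (n : Int) (m : Int) : Nat → Std.HashMap Int Int → Array Int → Int → Std.HashMap Int Int × Array Int × Int
  | 0, dct, lst, x => (dct, lst, x)
  | fuel + 1, dct, lst, x =>
    if dct.contains x then (dct, lst, x)
    else ccrLoop n m fuel (dct.insert x (lst.size : Int)) (lst.push x) (PySem.Int.mod (x + m) n)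

def compute_circle_result (n : Int) (m : Int) (x : Int) (tm : Int) : Int :=
  match ccrLoop n m (n.natAbs + 2) ∅ #[] x with
  | (dct, lst, xf) =>
    let length : Int := lst.size
    let ind : Int := dct.getD xf 0          -- dct[x]: present whenever the loop exited via the membership test
    if tm < length then PySem.List.pyGetD lst.toList tm 0
    else
      let circle := length - ind
      let j := PySem.Int.mod (tm - length) circle
      PySem.List.pyGetD lst.toList (ind + j) 0

-- ===== PORT B =====
def compute_circle_result_alt (n : Int) (m : Int) (x : Int) (tm : Int) : Int :=
  if tm = 0 then x else PySem.Int.mod (x + m * tm) n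

-- ===== PRECONDITION & SPEC =====
-- Pre_ excludes n = 0, where A raises ZeroDivisionError, and tm < 0, which is outside the natural
-- domain of a repetition count: there A raises IndexError when -tm exceeds the recorded prefix and
-- otherwise returns a negative-index wraparound value that is an artefact of A's list layout.
def Pre_compute_circle_result (n : Int) (m : Int) (x : Int) (tm : Int) : Prop := n ≠ 0 ∧ 0 ≤ tm
instance (n : Int) (m : Int) (x : Int) (tm : Int) : Decidable (Pre_compute_circle_result n m x tm) := by unfold Pre_compute_circle_result; infer_instance
def pvWitness_compute_circle_result : Int × Int × Int × Int := (5, 3, 2, 7)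

def Spec_compute_circle_result (n : Int) (m : Int) (x : Int) (tm : Int) (out : Int) : Prop := out = compute_circle_result_alt n m x tm
instance (n : Int) (m : Int) (x : Int) (tm : Int) (out : Int) : Decidable (Spec_compute_circle_result n m x tm out) := by unfold Spec_compute_circle_result; infer_instance

-- ===== CLAIM (what is proved, stated in full; the proofs are below) =====
def Claim_equal_compute_circle_result : Prop := ∀ (n : Int) (m : Int) (x : Int) (tm : Int), Dom_compute_circle_result n m x tm → Pre_compute_circle_result n m x tm → Spec_compute_circle_result n m x tm (compute_circle_result n m x tm)

-- ===== LEMMAS AND PROOFS =====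

-- the Python orbit: s 0 = x0, s (k+1) = (s k + m) % n
def pseq (n m x0 : Int) : Nat → Int
  | 0 => x0
  | k + 1 => PySem.Int.mod (pseq n m x0 k + m) n

-- fmod congruence facts
lemma emod_fmod (a n : Int) : (Int.fmod a n) % n = a % n := by
  rw [Int.fmod_eq_emod]
  split_ifs with h
  · simp
  · simpa using Int.add_mul_emod_self_left (a := a % n) (b := n) (c := 1)

lemma fmod_congr {a b : Int} (n : Int) (h : a % n = b % n) : Int.fmod a n = Int.fmod b n := by
  have hd : (n ∣ a) ↔ (n ∣ b) := by
    rw [Int.dvd_iff_emod_eq_zero, Int.dvd_iff_emod_eq_zero, h]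
  rw [Int.fmod_eq_emod, Int.fmod_eq_emod, h]
  by_cases h0 : 0 ≤ n
  · simp [h0]
  · simp [h0, hd]

lemma pseq_closed (n m x0 : Int) (k : Nat) (hk : 1 ≤ k) :
    pseq n m x0 k = PySem.Int.mod (x0 + m * k) n := by
  induction k with
  | zero => omega
  | succ k ih =>
    by_cases hk1 : 1 ≤ k
    · show PySem.Int.mod (pseq n m x0 k + m) n = _
      rw [ih hk1]
      show Int.fmod (Int.fmod (x0 + m * k) n + m) n = Int.fmod (x0 + m * (k + 1 : Nat)) n
      apply fmod_congr
      have h1 : (Int.fmod (x0 + m * k) n + m) % n = ((x0 + m * k) + m) % n := by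
        rw [Int.add_emod, emod_fmod, ← Int.add_emod]
      rw [h1]
      congr 1
      push_cast
      ring
    · have hk0 : k = 0 := by omega
      subst hk0
      show Int.fmod (x0 + m) n = Int.fmod (x0 + m * ((0 : Nat) + 1 : Nat)) n
      norm_num

-- the dict and list after k iterations of the loop
def hmOf (n m x0 : Int) (k : Nat) : Std.HashMap Int Int :=
  (List.range k).foldl (fun d i => d.insert (pseq n m x0 i) (i : Int)) ∅

def lstOf (n m x0 : Int) (k : Nat) : List Int := (List.range k).map (pseq n m x0)

lemma hmOf_succ (n m x0 : Int) (k : Nat) :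
    hmOf n m x0 (k + 1) = (hmOf n m x0 k).insert (pseq n m x0 k) (k : Int) := by
  simp [hmOf, List.range_succ]

lemma contains_hmOf_iff (n m x0 : Int) (k : Nat) (y : Int) :
    (hmOf n m x0 k).contains y = true ↔ ∃ i < k, pseq n m x0 i = y := by
  induction k with
  | zero => simp [hmOf]
  | succ k ih =>
    rw [hmOf_succ, Std.HashMap.contains_insert]
    simp only [Bool.or_eq_true, beq_iff_eq, ih]
    constructor
    · rintro (he | ⟨i, hi, he⟩)
      · exact ⟨k, by omega, he⟩
      · exact ⟨i, by omega, he⟩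
    · rintro ⟨i, hi, he⟩
      by_cases hik : i = k
      · subst hik; exact Or.inl he
      · exact Or.inr ⟨i, by omega, he⟩

lemma getD_hmOf (n m x0 : Int) (k : Nat) (i : Nat) (hi : i < k)
    (hinj : ∀ a b, a < k → b < k → pseq n m x0 a = pseq n m x0 b → a = b) :
    (hmOf n m x0 k).getD (pseq n m x0 i) 0 = (i : Int) := by
  induction k with
  | zero => omega
  | succ k ih =>
    rw [hmOf_succ, Std.HashMap.getD_insert]
    by_cases hik : i = k
    · subst hik; simp
    · have hne : (pseq n m x0 k == pseq n m x0 i) = false := by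
        simp only [beq_eq_false_iff_ne, ne_eq]
        intro he
        exact hik ((hinj k i (by omega) (by omega) he).symm)
      rw [hne]
      simp only [Bool.false_eq_true, if_false]
      exact ih (by omega) (fun a b ha hb => hinj a b (by omega) (by omega))

-- pigeonhole: an injective prefix of the orbit has length at most |n| + 1
lemma pseq_inj_bound (n m x0 : Int) (hn : n ≠ 0) (k : Nat)
    (hinj : ∀ i j, i < k → j < k → pseq n m x0 i = pseq n m x0 j → i = j) :
    k ≤ n.natAbs + 1 := by
  by_contra hk
  push Not at hk
  -- the values pseq (i+1), i < natAbs+1, are natAbs+1 distinct mod-n values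
  set lo : Int := if 0 < n then 0 else n + 1 with hlo
  have hmem : ∀ i : Nat, pseq n m x0 (i + 1) ∈ Finset.Ico lo (lo + n.natAbs) := by
    intro i
    have he : pseq n m x0 (i + 1) = PySem.Int.mod (pseq n m x0 i + m) n := rfl
    rw [he]
    rcases lt_or_gt_of_ne hn with hneg | hpos
    · have hb := PySem.Int.mod_neg_bounds (pseq n m x0 i + m) hneg
      have habs : (n.natAbs : Int) = -n := by omega
      simp only [hlo, if_neg (by omega : ¬ 0 < n), Finset.mem_Ico]
      omega
    · have h1 := PySem.Int.mod_nonneg (pseq n m x0 i + m) hpos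
      have h2 := PySem.Int.mod_lt (pseq n m x0 i + m) hpos
      have habs : (n.natAbs : Int) = n := by omega
      simp only [hlo, if_pos hpos, Finset.mem_Ico]
      omega
  have hcard : (Finset.range (n.natAbs + 1)).card ≤ (Finset.Ico lo (lo + n.natAbs)).card := by
    apply Finset.card_le_card_of_injOn (fun i => pseq n m x0 (i + 1))
    · intro i _; exact hmem i
    · intro i hi j hj he
      simp only [Finset.coe_range, Set.mem_Iio] at hi hj
      have := hinj (i + 1) (j + 1) (by omega) (by omega) he
      omega
  rw [Finset.card_range, Int.card_Ico] at hcard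
  omega

-- running the loop from iteration k reaches the first repeat
lemma ccrLoop_run (n m x0 : Int) (hn : n ≠ 0) (fuel : Nat) :
    ∀ k : Nat, n.natAbs + 2 ≤ fuel + k →
    (∀ i j, i < k → j < k → pseq n m x0 i = pseq n m x0 j → i = j) →
    ∃ r : Nat, k ≤ r ∧
      (∀ i j, i < r → j < r → pseq n m x0 i = pseq n m x0 j → i = j) ∧
      (∃ i < r, pseq n m x0 i = pseq n m x0 r) ∧
      ccrLoop n m fuel (hmOf n m x0 k) (lstOf n m x0 k).toArray (pseq n m x0 k)
        = (hmOf n m x0 r, (lstOf n m x0 r).toArray, pseq n m x0 r) := by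
  induction fuel with
  | zero =>
    intro k hfuel hinj
    exact absurd (pseq_inj_bound n m x0 hn k hinj) (by omega)
  | succ fuel ih =>
    intro k hfuel hinj
    by_cases hc : (hmOf n m x0 k).contains (pseq n m x0 k) = true
    · refine ⟨k, le_refl k, hinj, (contains_hmOf_iff n m x0 k _).mp hc, ?_⟩
      show (if (hmOf n m x0 k).contains (pseq n m x0 k) = true then _ else _) = _
      rw [if_pos hc]
    · -- fresh value: one step
      have hfresh : ∀ i, i < k → pseq n m x0 i ≠ pseq n m x0 k := by
        intro i hi he
        exact hc ((contains_hmOf_iff n m x0 k _).mpr ⟨i, hi, he⟩)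
      have hinj' : ∀ i j, i < k + 1 → j < k + 1 → pseq n m x0 i = pseq n m x0 j → i = j := by
        intro i j hi hj he
        rcases Nat.lt_succ_iff_lt_or_eq.mp hi with hi' | hi' <;>
          rcases Nat.lt_succ_iff_lt_or_eq.mp hj with hj' | hj'
        · exact hinj i j hi' hj' he
        · exact absurd (hj' ▸ he) (hfresh i hi')
        · exact absurd (hi' ▸ he.symm) (hfresh j hj')
        · omega
      have hstep : ccrLoop n m (fuel + 1) (hmOf n m x0 k) (lstOf n m x0 k).toArray (pseq n m x0 k)
          = ccrLoop n m fuel (hmOf n m x0 (k + 1)) (lstOf n m x0 (k + 1)).toArray (pseq n m x0 (k + 1)) := by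
        show (if (hmOf n m x0 k).contains (pseq n m x0 k) = true then _ else _) = _
        rw [if_neg hc]
        congr 1
        · rw [hmOf_succ]
          congr 1
          simp [lstOf]
        · rw [List.push_toArray]
          congr 1
          simp [lstOf, List.range_succ]
      rw [hstep]
      obtain ⟨r, hkr, h⟩ := ih (k + 1) (by omega) hinj'
      exact ⟨r, by omega, h⟩

lemma lstOf_length (n m x0 : Int) (r : Nat) : (lstOf n m x0 r).length = r := by
  simp [lstOf]

lemma pyGetD_lstOf (n m x0 : Int) (r : Nat) (i : Int) (h0 : 0 ≤ i) (hr : i < r) :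
    PySem.List.pyGetD (lstOf n m x0 r) i 0 = pseq n m x0 i.toNat := by
  rw [PySem.List.pyGetD_eq_getElem _ 0 h0 (by rw [lstOf_length]; exact hr)]
  simp [lstOf]

-- the main agreement argument on Pre_
lemma compute_eq (n m x0 tm : Int) (hn : n ≠ 0) (htm : 0 ≤ tm) :
    compute_circle_result n m x0 tm = compute_circle_result_alt n m x0 tm := by
  obtain ⟨r, -, hinj, ⟨ind, hindr, hrep⟩, hrun⟩ :=
    ccrLoop_run n m x0 hn (n.natAbs + 2) 0 (by omega) (by intro i j hi hj _; omega)
  have hr1 : 1 ≤ r := by omega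
  have hsr : pseq n m x0 r = PySem.Int.mod (x0 + m * r) n := pseq_closed n m x0 r hr1
  -- the key divisibility: n ∣ m * (r - ind)
  have hdvd : n ∣ m * ((r : Int) - (ind : Int)) := by
    by_cases hi0 : 1 ≤ ind
    · have hsi : pseq n m x0 ind = PySem.Int.mod (x0 + m * ind) n := pseq_closed n m x0 ind hi0
      have hmd : (x0 + m * (ind : Int)) % n = (x0 + m * (r : Int)) % n := by
        have h := congrArg (· % n) (hsi ▸ hsr ▸ hrep)
        simpa [PySem.Int.mod, emod_fmod] using h
      have hd := Int.ModEq.dvd (show Int.ModEq n _ _ from hmd)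
      have he : (x0 + m * (r : Int)) - (x0 + m * (ind : Int)) = m * ((r : Int) - (ind : Int)) := by
        ring
      rw [he] at hd
      exact hd
    · have hi0' : ind = 0 := by omega
      subst hi0'
      have hx0 : x0 = PySem.Int.mod (x0 + m * r) n := by rw [← hsr]; exact hrep
      have hmd : x0 % n = (x0 + m * (r : Int)) % n := by
        conv_lhs => rw [hx0]
        simp [PySem.Int.mod, emod_fmod]
      have hd := Int.ModEq.dvd (show Int.ModEq n _ _ from hmd)
      have he : (x0 + m * (r : Int)) - x0 = m * ((r : Int) - (0 : Nat)) := by push_cast; ring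
      rw [he] at hd
      exact hd
  -- run the loop inside the port
  have hrun0 : ccrLoop n m (n.natAbs + 2) ∅ #[] x0
      = (hmOf n m x0 r, (lstOf n m x0 r).toArray, pseq n m x0 r) := hrun
  have hindD : (hmOf n m x0 r).getD (pseq n m x0 r) 0 = (ind : Int) := by
    rw [← hrep]; exact getD_hmOf n m x0 r ind hindr hinj
  rw [show compute_circle_result n m x0 tm =
      (let length : Int := ((lstOf n m x0 r).toArray.size : Int)
       let ind' : Int := (hmOf n m x0 r).getD (pseq n m x0 r) 0
       if tm < length then PySem.List.pyGetD (lstOf n m x0 r).toArray.toList tm 0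
       else
         let circle := length - ind'
         let j := PySem.Int.mod (tm - length) circle
         PySem.List.pyGetD (lstOf n m x0 r).toArray.toList (ind' + j) 0) from by
    show compute_circle_result n m x0 tm = _
    unfold compute_circle_result
    rw [hrun0]]
  simp only [hindD, List.size_toArray, lstOf_length]
  by_cases htlt : tm < (r : Int)
  · rw [if_pos htlt]
    rw [pyGetD_lstOf n m x0 r tm htm htlt]
    by_cases ht0 : tm = 0
    · subst ht0
      simp [compute_circle_result_alt, pseq]
    · have h1 : 1 ≤ tm.toNat := by omega
      rw [pseq_closed n m x0 tm.toNat h1]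
      simp only [compute_circle_result_alt, if_neg ht0]
      rw [Int.toNat_of_nonneg htm]
  · rw [if_neg htlt]
    have htr : (r : Int) ≤ tm := by omega
    set circle : Int := (r : Int) - (ind : Int) with hcirc
    set j : Int := PySem.Int.mod (tm - (r : Int)) circle with hj
    clear_value circle j
    have hcpos : 0 < circle := by omega
    have hj0 : 0 ≤ j := hj ▸ PySem.Int.mod_nonneg _ hcpos
    have hjlt : j < circle := hj ▸ PySem.Int.mod_lt _ hcpos
    -- circle divides (tm - r) - j, hence n ∣ m * (tm - (ind + j))
    have hcd : circle ∣ (tm - (r : Int)) - j := by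
      refine ⟨PySem.Int.floordiv (tm - (r : Int)) circle, ?_⟩
      rw [hj]
      linarith [PySem.Int.floordiv_mul_add_mod (tm - (r : Int)) circle,
        mul_comm (PySem.Int.floordiv (tm - (r : Int)) circle) circle]
    have hdvd2 : n ∣ m * (tm - ((ind : Int) + j)) := by
      obtain ⟨q, hq⟩ := hcd
      have h2 : tm - ((ind : Int) + j) = circle * (q + 1) := by
        have hexp : circle * (q + 1) = circle * q + circle := by ring
        rw [hexp]
        linarith [hq, hcirc]
      rw [h2, ← mul_assoc]
      exact Dvd.dvd.mul_right hdvd _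
    have hmodeq : (x0 + m * tm) % n = (x0 + m * ((ind : Int) + j)) % n := by
      have h : n ∣ (x0 + m * ((ind : Int) + j)) - (x0 + m * tm) := by
        rw [show (x0 + m * ((ind : Int) + j)) - (x0 + m * tm)
            = -(m * (tm - ((ind : Int) + j))) by ring]
        exact dvd_neg.mpr hdvd2
      exact Int.modEq_iff_dvd.mpr h
    have htm0 : tm ≠ 0 := by omega
    rw [pyGetD_lstOf n m x0 r ((ind : Int) + j) (by omega) (by omega)]
    by_cases huz : ((ind : Int) + j) = 0
    · -- ind = 0 and j = 0: the returned element is x0, and the closed form also reduces to x0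
      have hi0 : ind = 0 := by omega
      have hjz : j = 0 := by omega
      rw [show ((ind : Int) + j).toNat = 0 by omega]
      show x0 = compute_circle_result_alt n m x0 tm
      have hx0 : x0 = PySem.Int.mod (x0 + m * r) n := by
        rw [← hsr, ← hrep, hi0]; exact rfl
      simp only [compute_circle_result_alt, if_neg htm0]
      have hfix : PySem.Int.mod x0 n = x0 := by
        conv_lhs => rw [hx0]
        show Int.fmod (Int.fmod (x0 + m * (r : Int)) n) n = _
        rw [Int.fmod_fmod_of_dvd _ (dvd_refl n)]
        exact hx0.symm
      calc x0 = PySem.Int.mod x0 n := hfix.symm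
        _ = PySem.Int.mod (x0 + m * tm) n := by
              apply fmod_congr
              have h9 : (x0 + m * ((ind : Int) + j)) % n = x0 % n := by
                rw [huz]; ring_nf
              exact (hmodeq.trans h9).symm
    · have hu1 : 1 ≤ ((ind : Int) + j).toNat := by omega
      rw [pseq_closed n m x0 _ hu1]
      simp only [compute_circle_result_alt, if_neg htm0]
      apply fmod_congr
      rw [show ((((ind : Int) + j).toNat : Int)) = (ind : Int) + j by omega]
      exact hmodeq.symm

-- ===== VERDICT (by name: the statement is the Claim_ definition above) =====
theorem compute_circle_result_spec : Claim_equal_compute_circle_result := by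
  intro n m x tm _ hpre
  exact compute_eq n m x tm hpre.1 hpre.2
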